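-- pv_equiv track=rewrite | github.com/loveAlakazam/Sneaking_Algorithm | 2018-2019/level1/크레인인형뽑기.py | solution
-- ===== SOURCE A (Python) =====
-- def solution(board, moves):
--     stack=[]
--     answer = 0
--
--     # 인형 나열
--     maps={}
--     lenb=len(board)
--     for c in range(lenb):
--         maps[c]=[]
--         for r in range(lenb):
--             if board[r][c]!=0:
--                 maps[c].append(board[r][c])
--         maps[c]=maps[c][::-1]
--
--
--     for m in moves:
--         # 스택이 비어있지 않다면
--         if len(maps[m-1])>0:
--             #maps[m]에서 인형을 하나 꺼낸다.
--             x=maps[m-1][-1]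
--
--             # 스택이 비어있지 않다면
--             if len(stack)>0:
--                 s= stack[-1]
--                 #인형과 stack 맨위에있는 인형이 서로 같다면
--                 if x==s:
--                     answer+=1
--                     maps[m-1].pop()
--                     stack.pop()
--
--                 #다르다면
--                 else:
--                     stack.append(x)
--                     maps[m-1].pop()
--
--
--             # 스택이 비어있다면
--             else:
--                 stack.append(x)
--                 maps[m-1].pop()
--
--     return 2*answer
-- ===== SOURCE B (Python) =====
-- def solution(board, moves):
--     n = len(board)
--     ptr = [0] * n          # per-column count of rows already consumed
--     stack = []
--     pairs = 0
--     for m in moves: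
--         c = m - 1
--         r = ptr[c]
--         while r < n and board[r][c] == 0:
--             r += 1
--         if r < n:
--             ptr[c] = r + 1
--             x = board[r][c]
--             if stack and stack[-1] == x:
--                 stack.pop()
--                 pairs += 1
--             else:
--                 stack.append(x)
--     return 2 * pairs
-- ===== Notes on version B (the rewrite author's own statement) =====
-- stated objective: alternative
-- what changed: B drops A's precomputed dict of reversed per-column stacks and instead keeps a per-column consumed-row pointer, scanning the untouched board downward on demand at each move; the pairing stack and doubled count are maintained in the same single pass over moves.
import Mathlib
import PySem

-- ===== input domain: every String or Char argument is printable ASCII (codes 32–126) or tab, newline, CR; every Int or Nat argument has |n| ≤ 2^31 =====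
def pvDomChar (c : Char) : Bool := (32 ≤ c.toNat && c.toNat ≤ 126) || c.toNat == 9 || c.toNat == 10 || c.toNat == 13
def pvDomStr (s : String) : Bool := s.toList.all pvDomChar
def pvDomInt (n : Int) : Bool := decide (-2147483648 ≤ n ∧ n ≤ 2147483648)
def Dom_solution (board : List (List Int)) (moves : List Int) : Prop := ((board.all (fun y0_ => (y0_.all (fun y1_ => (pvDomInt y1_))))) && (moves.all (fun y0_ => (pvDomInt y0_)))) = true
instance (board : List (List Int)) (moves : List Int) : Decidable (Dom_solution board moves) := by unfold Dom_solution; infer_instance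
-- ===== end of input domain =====

-- B drops A's precomputed dict of reversed per-column stacks for a per-column consumed-row
-- pointer that scans the untouched board downward on demand (objective: alternative).

-- ===== PORT A =====
-- board[r][c]; both indices lie in range(len(board)) under Pre_solution, where pyGetD is exact
def pyCellA (board : List (List Int)) (r c : Int) : Int :=
  PySem.List.pyGetD (PySem.List.pyGetD board r []) c 0

-- A's two nested 'for' loops: maps[c] = reversed non-zero entries of column c
def buildMaps (board : List (List Int)) : PySem.Dict Int (List Int) :=
  (PySem.List.pyRange 0 (PySem.List.len board) 1).foldl (fun d c =>
    let col := (PySem.List.pyRange 0 (PySem.List.len board) 1).foldl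
      (fun acc r => if pyCellA board r c ≠ 0 then acc ++ [pyCellA board r c] else acc) []
    d.insert c ((PySem.List.slice? col none none (-1)).getD []))   -- maps[c] = maps[c][::-1]
    PySem.Dict.empty

-- the body of A's 'for m in moves' loop; state = (maps, stack, answer)
def stepA (st : PySem.Dict Int (List Int) × List Int × Int) (m : Int) :
    PySem.Dict Int (List Int) × List Int × Int :=
  let col := st.1.getD (m-1) []          -- maps[m-1]; the key exists under Pre_solution
  if col.length > 0 then
    let x := PySem.List.pyGetD col (-1) 0       -- maps[m-1][-1]
    if st.2.1.length > 0 then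
      let s := PySem.List.pyGetD st.2.1 (-1) 0  -- stack[-1]
      if x = s then (st.1.insert (m-1) col.dropLast, (st.2.1.dropLast, st.2.2 + 1))
      else (st.1.insert (m-1) col.dropLast, (st.2.1 ++ [x], st.2.2))
    else (st.1.insert (m-1) col.dropLast, (st.2.1 ++ [x], st.2.2))
  else st

def solution (board : List (List Int)) (moves : List Int) : Int :=
  2 * (moves.foldl stepA (buildMaps board, ([], 0))).2.2

-- ===== PORT B =====
-- board[r][c] for natural in-range indices (exact under Pre_solution)
def cellB (board : List (List Int)) (r c : Nat) : Int := (board.getD r []).getD c 0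

-- B's 'while r < n and board[r][c] == 0: r += 1' loop
def bScan (board : List (List Int)) (c r n : Nat) : Nat :=
  if h : r < n then (if cellB board r c = 0 then bScan board c (r+1) n else r) else r
termination_by n - r

-- the body of B's 'for m in moves' loop; state = (ptr, stack, pairs)
def stepB (board : List (List Int)) (n : Nat) (st : List Nat × List Int × Int) (m : Int) :
    List Nat × List Int × Int :=
  let c := (m - 1).toNat                 -- m ≥ 1 under Pre_solution
  let r := bScan board c (st.1.getD c 0) n
  if r < n then
    let x := cellB board r c
    if st.2.1.getLast? = some x then     -- 'stack and stack[-1] == x'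
      (st.1.set c (r + 1), (st.2.1.dropLast, st.2.2 + 1))
    else
      (st.1.set c (r + 1), (st.2.1 ++ [x], st.2.2))
  else st

def solution_alt (board : List (List Int)) (moves : List Int) : Int :=
  2 * (moves.foldl (stepB board board.length) (List.replicate board.length 0, ([], 0))).2.2

-- ===== PRECONDITION & SPEC =====
-- Pre_solution is exactly where the Python A returns: A raises IndexError when some row is
-- shorter than len(board), and KeyError on a move outside 1..len(board) (maps[m-1] missing).
def Pre_solution (board : List (List Int)) (moves : List Int) : Prop :=
  (∀ row ∈ board, board.length ≤ row.length) ∧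
  (∀ m ∈ moves, 1 ≤ m ∧ m ≤ (board.length : Int))
instance (board : List (List Int)) (moves : List Int) : Decidable (Pre_solution board moves) := by
  unfold Pre_solution; infer_instance

def pvWitness_solution : List (List Int) × List Int := ([[0, 1], [2, 1]], [1, 2, 2])

def Spec_solution (board : List (List Int)) (moves : List Int) (out : Int) : Prop := out = solution_alt board moves
instance (board : List (List Int)) (moves : List Int) (out : Int) : Decidable (Spec_solution board moves out) := by unfold Spec_solution; infer_instance

-- ===== CLAIM (what is proved, stated in full; the proofs are below) =====
def Claim_equal_solution : Prop := ∀ (board : List (List Int)) (moves : List Int), Dom_solution board moves → Pre_solution board moves → Spec_solution board moves (solution board moves)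

-- ===== LEMMAS AND PROOFS =====

-- the non-zero entries of column c among rows k, k+1, …
def colTail (board : List (List Int)) (c k : Nat) : List Int :=
  ((board.drop k).map (fun row => row.getD c 0)).filter (fun v => decide (v ≠ 0))

theorem colTail_of_le (board : List (List Int)) (c k : Nat) (h : board.length ≤ k) :
    colTail board c k = [] := by
  simp [colTail, List.drop_eq_nil_of_le h]

theorem colTail_succ (board : List (List Int)) (c k : Nat) (h : k < board.length) :
    colTail board c k =
      if cellB board k c = 0 then colTail board c (k+1)
      else cellB board k c :: colTail board c (k+1) := by
  have hd : board.drop k = board[k] :: board.drop (k+1) := List.drop_eq_getElem_cons h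
  have hg : board.getD k [] = board[k] := List.getD_eq_getElem board [] h
  simp only [colTail, hd, cellB, hg, List.map_cons, List.filter_cons]
  split_ifs with h1 h2 h2 <;> simp_all

-- bScan finds exactly the head of colTail (or exhausts the column)
theorem bScan_spec (board : List (List Int)) (c : Nat) (k : Nat) (hk : k ≤ board.length) :
    (bScan board c k board.length = board.length ∧ colTail board c k = []) ∨
    (∃ r, bScan board c k board.length = r ∧ r < board.length ∧
      colTail board c k = cellB board r c :: colTail board c (r+1)) := by
  by_cases h : k < board.length
  · rw [bScan]
    simp only [h, dif_pos]
    by_cases hz : cellB board k c = 0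
    · rw [if_pos hz]
      have := bScan_spec board c (k+1) h
      rcases this with ⟨h1, h2⟩ | ⟨r, h1, h2, h3⟩
      · left; exact ⟨h1, by rw [colTail_succ board c k h, if_pos hz]; exact h2⟩
      · right; exact ⟨r, h1, h2, by rw [colTail_succ board c k h, if_pos hz]; exact h3⟩
    · right
      exact ⟨k, by rw [if_neg hz], h, by rw [colTail_succ board c k h, if_neg hz]⟩
  · left
    have hkn : k = board.length := le_antisymm hk (le_of_not_gt h)
    rw [bScan]
    simp [hkn, colTail_of_le]
termination_by board.length - k

-- A's inner column-building fold equals colTail from row 0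
theorem colA_eq (board : List (List Int)) (c : Int) (hc : 0 ≤ c) :
    (PySem.List.pyRange 0 (PySem.List.len board) 1).foldl
      (fun acc r => if pyCellA board r c ≠ 0 then acc ++ [pyCellA board r c] else acc) []
    = colTail board c.toNat 0 := by
  rw [PySem.List.foldl_append_ite (p := fun r => pyCellA board r c ≠ 0)
      (f := fun r => pyCellA board r c)]
  rw [List.nil_append]
  have key : List.map (fun r => pyCellA board r c)
      (List.filter (fun x => decide (pyCellA board x c ≠ 0)) (PySem.List.pyRange 0 (PySem.List.len board) 1))
      = List.filter (fun v => decide (v ≠ 0))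
        (List.map (fun r => pyCellA board r c) (PySem.List.pyRange 0 (PySem.List.len board) 1)) :=
    (List.filter_map (f := fun r => pyCellA board r c) (p := fun v => decide (v ≠ 0))).symm
  rw [key]
  have h1 : (PySem.List.pyRange 0 (PySem.List.len board) 1).map (fun r => pyCellA board r c)
      = board.map (fun row => row.getD c.toNat 0) := by
    have h0 : (fun r => pyCellA board r c)
        = (fun row => PySem.List.pyGetD row c 0) ∘ (fun r => PySem.List.pyGetD board r []) := rfl
    rw [h0, ← List.map_map, PySem.List.map_pyGetD_pyRange_zero]
    apply List.map_congr_left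
    intro row _
    rw [PySem.List.pyGetD_of_nonneg _ _ hc]
  rw [h1]
  rfl

theorem fold_ins (board : List (List Int)) (k cn : Nat) (h : cn < k) :
    ((PySem.List.pyRange 0 (k:Int) 1).foldl (fun d c =>
      let col := (PySem.List.pyRange 0 (PySem.List.len board) 1).foldl
        (fun acc r => if pyCellA board r c ≠ 0 then acc ++ [pyCellA board r c] else acc) []
      d.insert c ((PySem.List.slice? col none none (-1)).getD []))
      PySem.Dict.empty).getD (cn : Int) []
    = (colTail board cn 0).reverse := by
  induction k with
  | zero => omega
  | succ k ih =>
    have hcast : ((k+1 : Nat) : Int) = (k : Int) + 1 := by push_cast; ring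
    rw [hcast, PySem.List.pyRange_one_succ_right (by positivity), List.foldl_append]
    simp only [List.foldl_cons, List.foldl_nil]
    rw [PySem.Dict.getD_insert]
    by_cases hck : cn = k
    · rw [if_pos (by exact_mod_cast hck)]
      rw [PySem.List.slice?_none_none_neg_one, Option.getD_some,
          colA_eq board (k:Int) (by positivity)]
      simp [hck]
    · rw [if_neg (by exact_mod_cast hck)]
      exact ih (by omega)

theorem buildMaps_getD (board : List (List Int)) (cn : Nat) (h : cn < board.length) :
    (buildMaps board).getD (cn : Int) [] = (colTail board cn 0).reverse := by
  unfold buildMaps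
  rw [show PySem.List.len board = (board.length : Int) from PySem.List.len_eq board]
  exact fold_ins board board.length cn h

-- the coupling invariant between A's maps and B's pointer array
def CraneInv (board : List (List Int)) (d : PySem.Dict Int (List Int)) (ptr : List Nat) : Prop :=
  ptr.length = board.length ∧
  ∀ c : Nat, c < board.length →
    ptr.getD c 0 ≤ board.length ∧
    d.getD (c : Int) [] = (colTail board c (ptr.getD c 0)).reverse

theorem step_eq (board : List (List Int)) (m : Int) (hm : 1 ≤ m ∧ m ≤ (board.length : Int))
    (d : PySem.Dict Int (List Int)) (ptr : List Nat) (st : List Int) (a : Int)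
    (hinv : CraneInv board d ptr) :
    CraneInv board (stepA (d, (st, a)) m).1 (stepB board board.length (ptr, (st, a)) m).1 ∧
    (stepA (d, (st, a)) m).2 = (stepB board board.length (ptr, (st, a)) m).2 := by
  obtain ⟨hptrlen, hco⟩ := hinv
  have hm1 : (0:Int) ≤ m - 1 := by omega
  have hcast : ((m-1).toNat : Int) = m - 1 := Int.toNat_of_nonneg hm1
  have hcn : (m-1).toNat < board.length := by omega
  obtain ⟨hk0le, hcol⟩ := hco (m-1).toNat hcn
  rw [hcast] at hcol
  rcases bScan_spec board (m-1).toNat (ptr.getD (m-1).toNat 0) hk0le with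
    ⟨hr, hct⟩ | ⟨r, hr, hrn, hct⟩
  · -- the column is exhausted: both sides skip the move
    have hA : stepA (d, (st, a)) m = (d, (st, a)) := by
      simp only [stepA]
      rw [hcol, hct]
      simp
    have hB : stepB board board.length (ptr, (st, a)) m = (ptr, (st, a)) := by
      simp only [stepB]
      rw [hr]
      simp
    rw [hA, hB]
    exact ⟨⟨hptrlen, hco⟩, rfl⟩
  · -- a doll is found at row r
    have hxA : PySem.List.pyGetD ((cellB board r (m-1).toNat :: colTail board (m-1).toNat (r+1)).reverse) (-1) 0
        = cellB board r (m-1).toNat := by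
      rw [List.reverse_cons]
      exact PySem.List.pyGetD_neg_one_append_singleton _ _ _
    have hdrop : ((cellB board r (m-1).toNat :: colTail board (m-1).toNat (r+1)).reverse).dropLast
        = (colTail board (m-1).toNat (r+1)).reverse := by
      rw [List.reverse_cons]
      exact List.dropLast_concat
    have hA : stepA (d, (st, a)) m =
        (d.insert (m-1) (colTail board (m-1).toNat (r+1)).reverse,
          if st.getLast? = some (cellB board r (m-1).toNat) then (st.dropLast, a+1)
          else (st ++ [cellB board r (m-1).toNat], a)) := by
      simp only [stepA]
      rw [hcol, hct, hxA, hdrop]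
      generalize (colTail board (m-1).toNat (r+1)) = t
      generalize (cellB board r (m-1).toNat) = x
      rcases List.eq_nil_or_concat st with rfl | ⟨ys, y, rfl⟩
      · simp
      · have hs : PySem.List.pyGetD (ys.concat y) (-1) 0 = y := by
          rw [List.concat_eq_append]
          exact PySem.List.pyGetD_neg_one_append_singleton _ _ _
        rw [hs]
        by_cases hxy : x = y
        · simp [List.concat_eq_append, hxy]
        · have hyx : ¬ (y = x) := fun h => hxy h.symm
          simp [List.concat_eq_append, hxy, hyx]
    have hB : stepB board board.length (ptr, (st, a)) m =
        (ptr.set (m-1).toNat (r+1),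
          if st.getLast? = some (cellB board r (m-1).toNat) then (st.dropLast, a+1)
          else (st ++ [cellB board r (m-1).toNat], a)) := by
      simp only [stepB]
      rw [hr, if_pos hrn]
      split_ifs <;> rfl
    rw [hA, hB]
    refine ⟨⟨?_, ?_⟩, by split <;> rfl⟩
    · simp [hptrlen]
    · intro c' hc'
      by_cases hcc : c' = (m-1).toNat
      · have hget : (ptr.set (m-1).toNat (r+1)).getD c' 0 = r + 1 := by
          rw [hcc, List.getD_eq_getElem?_getD, List.getElem?_set_self']
          rw [List.getElem?_eq_getElem (by omega : (m-1).toNat < ptr.length)]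
          rfl
        have hkey : (c' : Int) = m - 1 := by rw [hcc]; exact hcast
        rw [hget, PySem.Dict.getD_insert, if_pos hkey, hcc]
        exact ⟨by omega, rfl⟩
      · have hget : (ptr.set (m-1).toNat (r+1)).getD c' 0 = ptr.getD c' 0 := by
          rw [List.getD_eq_getElem?_getD, List.getD_eq_getElem?_getD,
              List.getElem?_set_ne (by omega : (m-1).toNat ≠ c')]
        have hne : (c' : Int) ≠ m - 1 := by omega
        rw [hget, PySem.Dict.getD_insert, if_neg hne]
        exact hco c' hc'

theorem loop_eq (board : List (List Int)) (moves : List Int) :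
    (∀ m ∈ moves, 1 ≤ m ∧ m ≤ (board.length : Int)) →
    ∀ (d : PySem.Dict Int (List Int)) (ptr : List Nat) (st : List Int) (a : Int),
      CraneInv board d ptr →
      (moves.foldl stepA (d, (st, a))).2 =
      (moves.foldl (stepB board board.length) (ptr, (st, a))).2 := by
  induction moves with
  | nil => intro _ d ptr st a _; rfl
  | cons m rest ih =>
    intro hm d ptr st a hinv
    have hstep := step_eq board m (hm m (by simp)) d ptr st a hinv
    have hmrest : ∀ x ∈ rest, 1 ≤ x ∧ x ≤ (board.length : Int) :=
      fun x hx => hm x (by simp [hx])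
    simp only [List.foldl_cons]
    have eA : stepA (d,(st,a)) m
        = ((stepA (d,(st,a)) m).1, ((stepA (d,(st,a)) m).2.1, (stepA (d,(st,a)) m).2.2)) := rfl
    have eB : stepB board board.length (ptr,(st,a)) m
        = ((stepB board board.length (ptr,(st,a)) m).1,
           ((stepA (d,(st,a)) m).2.1, (stepA (d,(st,a)) m).2.2)) := by
      rw [hstep.2]
    rw [eA, eB]
    exact ih hmrest _ _ _ _ hstep.1

theorem inv_init (board : List (List Int)) :
    CraneInv board (buildMaps board) (List.replicate board.length 0) := by
  refine ⟨by simp, fun c hc => ?_⟩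
  have hz : (List.replicate board.length (0:Nat)).getD c 0 = 0 := by
    simp [List.getD_eq_getElem?_getD, hc]
  rw [hz]
  exact ⟨Nat.zero_le _, buildMaps_getD board c hc⟩

-- ===== VERDICT (by name: the statement is the Claim_ definition above) =====
theorem solution_spec : Claim_equal_solution := by
  intro board moves _ hpre
  unfold Spec_solution solution solution_alt
  rw [loop_eq board moves hpre.2 (buildMaps board) (List.replicate board.length 0) [] 0
    (inv_init board)]
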